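-- pv_equiv track=rewrite | github.com/MercenaryLogic/StompingGround | stompingground/util/bitmasks.py | int_to_ascii_inverse
-- ===== SOURCE A (Python) =====
-- def int_to_ascii_inverse(n):
-- 		"""convert unsigned integer to ASCII binary representation"""
-- 		s = ''
-- 		while n != 0:
-- 			if n % 2 == 0: bit = '1'
-- 			else: bit = '0'
-- 			s = bit + s
-- 			n >>= 1
-- 		s = ('0' * (32 - len(s))) + s
-- 		return s or '0'
-- ===== SOURCE B (Python) =====
-- def int_to_ascii_inverse(n):
--     """convert unsigned integer to ASCII binary representation"""
--     if n == 0: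
--         return '0' * 32
--     w = n.bit_length()
--     inv = (1 << w) - 1 - n
--     return format(inv, '0' + str(w) + 'b').rjust(32, '0')
-- ===== Notes on version B (the rewrite author's own statement) =====
-- stated objective: simpler
-- what changed: Replaces A's per-bit while loop that prepends inverted bit characters one at a time with a closed-form computation: inv = (1 << n.bit_length()) - 1 - n formatted as zero-padded binary and right-justified to 32; n == 0 is the one special case (32 zeros). Pre_ excludes n < 0, on which A's while loop never terminates (n >>= 1 is the identity on -1).
import Mathlib
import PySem

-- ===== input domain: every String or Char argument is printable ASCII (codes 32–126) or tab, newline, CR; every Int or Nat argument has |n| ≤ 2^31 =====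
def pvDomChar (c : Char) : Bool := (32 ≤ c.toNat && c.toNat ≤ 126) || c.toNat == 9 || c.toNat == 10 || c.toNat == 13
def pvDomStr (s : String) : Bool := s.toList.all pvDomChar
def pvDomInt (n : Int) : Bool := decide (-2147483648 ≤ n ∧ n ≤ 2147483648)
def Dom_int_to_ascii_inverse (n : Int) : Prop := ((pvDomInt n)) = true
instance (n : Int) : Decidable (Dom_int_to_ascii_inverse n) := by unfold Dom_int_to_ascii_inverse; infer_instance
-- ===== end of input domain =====

-- B replaces A's per-bit prepend loop by a closed form: invert the n.bit_length() low bits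
-- at once (inv = (1 << w) - 1 - n), format in binary zero-padded to w, and rjust to 32 ('simpler').

-- ===== PORT A =====
-- the while loop, with accumulator s; for n < 0 Python never terminates ('n >>= 1' is the
-- identity on -1), so the 'n ≤ 0' guard only makes the port total outside Pre_.
def aLoop (n : Int) (s : List Char) : List Char :=
  if n ≤ 0 then s
  else aLoop (PySem.Int.floordiv n 2)
             ((if PySem.Int.mod n 2 = 0 then '1' else '0') :: s)
termination_by n.toNat
decreasing_by
  rw [PySem.Int.floordiv_eq_ediv_of_pos (by omega)]
  omega

def int_to_ascii_inverse (n : Int) : String :=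
  let s := aLoop n []
  let s := List.replicate (32 - s.length) '0' ++ s
  if s = [] then "0" else String.mk s

-- ===== PORT B =====
-- format(m, 'b') without width: '' for 0 (only ever used under zero padding of width ≥ 1,
-- where the combined result is exact, including format(0, '0wb') = '0'*w)
def bBinDigits (m : Nat) : List Char :=
  if m = 0 then []
  else bBinDigits (m / 2) ++ [if m % 2 = 1 then '1' else '0']
termination_by m
decreasing_by omega

-- format(m, '0' + str(w) + 'b') for w ≥ 1
def bPadBin (m w : Nat) : List Char :=
  List.replicate (w - (bBinDigits m).length) '0' ++ bBinDigits m

def int_to_ascii_inverse_alt (n : Int) : String :=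
  if n = 0 then String.mk (List.replicate 32 '0')
  else
    let w := PySem.Int.bitLength n
    let inv := ((2 ^ w : Int) - 1 - n).toNat   -- (1 << w) - 1 - n (nonnegative whenever format would accept it)
    let s := bPadBin inv w
    String.mk (List.replicate (32 - s.length) '0' ++ s)   -- .rjust(32, '0')

-- ===== PRECONDITION & SPEC =====
-- A's while loop never terminates for n < 0 ('n >>= 1' fixes -1), so Pre_ keeps the
-- unsigned domain the docstring states.
def Pre_int_to_ascii_inverse (n : Int) : Prop := 0 ≤ n
instance (n : Int) : Decidable (Pre_int_to_ascii_inverse n) := by unfold Pre_int_to_ascii_inverse; infer_instance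
def pvWitness_int_to_ascii_inverse : Int := (5)

def Spec_int_to_ascii_inverse (n : Int) (out : String) : Prop := out = int_to_ascii_inverse_alt n
instance (n : Int) (out : String) : Decidable (Spec_int_to_ascii_inverse n out) := by unfold Spec_int_to_ascii_inverse; infer_instance

-- ===== CLAIM (what is proved, stated in full; the proofs are below) =====
def Claim_equal_int_to_ascii_inverse : Prop := ∀ (n : Int), Dom_int_to_ascii_inverse n → Pre_int_to_ascii_inverse n → Spec_int_to_ascii_inverse n (int_to_ascii_inverse n)

-- ===== LEMMAS AND PROOFS =====

-- A's loop, LSB first with prepending, equals this MSB-first recursion on Nat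
def recN (m : Nat) : List Char :=
  if m = 0 then []
  else recN (m / 2) ++ [if m % 2 = 0 then '1' else '0']
termination_by m
decreasing_by omega

theorem aLoop_eq (m : Nat) : ∀ s, aLoop (m : Int) s = recN m ++ s := by
  induction m using Nat.strong_induction_on with
  | _ m ih =>
    intro s
    rw [aLoop, recN]
    by_cases h : m = 0
    · simp [h]
    · have h0 : ¬ ((m : Int) ≤ 0) := by omega
      simp only [h0, if_false, h, if_false]
      rw [show PySem.Int.floordiv (m : Int) 2 = ((m / 2 : Nat) : Int) from
            by exact_mod_cast PySem.Int.floordiv_natCast m 2]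
      rw [ih (m / 2) (by omega)]
      have hm : PySem.Int.mod (m : Int) 2 = ((m % 2 : Nat) : Int) := by
        exact_mod_cast PySem.Int.mod_natCast m 2
      have : (PySem.Int.mod (m : Int) 2 = 0) ↔ (m % 2 = 0) := by
        rw [hm]; exact_mod_cast Int.natCast_eq_zero
      simp only [this]
      simp

theorem len_binDigits_le : ∀ (w m : Nat), m < 2 ^ w → (bBinDigits m).length ≤ w := by
  intro w
  induction w with
  | zero => intro m hm; interval_cases m; simp [bBinDigits]
  | succ w ih =>
    intro m hm
    rw [bBinDigits]
    by_cases h : m = 0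
    · simp [h]
    · have h2 : m / 2 < 2 ^ w := by
        have : 2 ^ (w + 1) = 2 * 2 ^ w := by ring
        omega
      simp only [h, if_false, List.length_append, List.length_singleton]
      have := ih (m / 2) h2
      omega

theorem padBin_step (m w : Nat) (hw : 1 ≤ w) (hm : m < 2 ^ w) :
    bPadBin m w = bPadBin (m / 2) (w - 1) ++ [if m % 2 = 1 then '1' else '0'] := by
  by_cases h : m = 0
  · subst h
    have hb : bBinDigits 0 = [] := by rw [bBinDigits]; simp
    have hr : List.replicate w '0' = List.replicate (w - 1) '0' ++ ['0'] := by
      conv_lhs => rw [show w = (w - 1) + 1 from by omega]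
      rw [List.replicate_succ']
    simp [bPadBin, hb, hr]
  · have hhalf : m / 2 < 2 ^ (w - 1) := by
      have : 2 ^ w = 2 * 2 ^ (w - 1) := by
        rw [← pow_succ']; congr 1; omega
      omega
    have hL : (bBinDigits (m / 2)).length ≤ w - 1 := len_binDigits_le _ _ hhalf
    have hb : bBinDigits m = bBinDigits (m / 2) ++ [if m % 2 = 1 then '1' else '0'] := by
      rw [bBinDigits]; simp [h]
    simp only [bPadBin, hb, List.length_append, List.length_cons, List.length_nil,
      Nat.zero_add]
    rw [← List.append_assoc,
        show w - ((bBinDigits (m / 2)).length + 1) = w - 1 - (bBinDigits (m / 2)).length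
          from by omega]

-- the heart: A's inverted-bit recursion is the zero-padded binary form of 2^w - 1 - m
theorem recN_eq_padBin : ∀ m : Nat, 1 ≤ m →
    recN m = bPadBin (2 ^ PySem.Int.bitLength (m : Int) - 1 - m) (PySem.Int.bitLength (m : Int)) := by
  intro m
  induction m using Nat.strong_induction_on with
  | _ m ih =>
    intro hm
    set w := PySem.Int.bitLength (m : Int) with hwdef
    have hsplit : w = PySem.Int.bitLength ((m / 2 : Nat) : Int) + 1 :=
      PySem.Int.bitLength_natCast (by omega)
    have hlt : m < 2 ^ w := by
      have := PySem.Int.lt_two_pow_bitLength (m : Int)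
      simpa using this
    have hw1 : 1 ≤ w := by omega
    have hp : 2 ^ w = 2 * 2 ^ (w - 1) := by
      rw [← pow_succ']; congr 1; omega
    have hinvlt : 2 ^ w - 1 - m < 2 ^ w := by omega
    rw [recN, if_neg (by omega)]
    rw [padBin_step _ _ hw1 hinvlt]
    have hdiv : (2 ^ w - 1 - m) / 2 = 2 ^ (w - 1) - 1 - m / 2 := by omega
    have hmod : ((2 ^ w - 1 - m) % 2 = 1) ↔ (m % 2 = 0) := by omega
    rw [hdiv]
    congr 1
    · by_cases h1 : m / 2 = 0
      · -- m = 1 : both sides are []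
        have hm1 : m = 1 := by omega
        subst hm1
        have hw : w = 1 := by
          rw [hwdef]; decide
        rw [h1, recN, if_pos rfl, hw]
        simp [bPadBin, bBinDigits]
      · rw [ih (m / 2) (by omega) (by omega),
            show PySem.Int.bitLength ((m / 2 : Nat) : Int) = w - 1 from by omega]
    · simp [hmod]

theorem len_padBin (m w : Nat) (hm : m < 2 ^ w) : (bPadBin m w).length = w := by
  have := len_binDigits_le w m hm
  simp only [bPadBin, List.length_append, List.length_replicate]
  omega

-- ===== VERDICT (by name: the statement is the Claim_ definition above) =====
theorem int_to_ascii_inverse_spec : Claim_equal_int_to_ascii_inverse := by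
  unfold Claim_equal_int_to_ascii_inverse
  intro n _ hpre
  unfold Spec_int_to_ascii_inverse Pre_int_to_ascii_inverse at *
  unfold int_to_ascii_inverse int_to_ascii_inverse_alt
  by_cases h0 : n = 0
  · subst h0
    rw [show aLoop 0 [] = recN 0 ++ [] from aLoop_eq 0 []]
    simp [recN]
  · -- n > 0
    obtain ⟨m, rfl⟩ : ∃ m : Nat, n = (m : Int) := ⟨n.toNat, by omega⟩
    have hm1 : 1 ≤ m := by omega
    simp only [if_neg h0]
    set w := PySem.Int.bitLength (m : Int) with hwdef
    have hlt : m < 2 ^ w := by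
      have := PySem.Int.lt_two_pow_bitLength (m : Int)
      simpa using this
    have hinv : ((2 ^ w : Int) - 1 - (m : Int)).toNat = 2 ^ w - 1 - m := by
      have : ((2 ^ w : Nat) : Int) = (2 ^ w : Int) := by push_cast; ring
      omega
    rw [aLoop_eq m [], List.append_nil, recN_eq_padBin m hm1, ← hwdef, hinv]
    have hlen : (bPadBin (2 ^ w - 1 - m) w).length = w := len_padBin _ _ (by omega)
    have hne : List.replicate (32 - (bPadBin (2 ^ w - 1 - m) w).length) '0'
        ++ bPadBin (2 ^ w - 1 - m) w ≠ [] := by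
      intro hcontra
      have := congrArg List.length hcontra
      simp only [List.length_append, List.length_replicate, List.length_nil] at this
      omega
    simp only [if_neg hne]
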